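-- pv_equiv track=rewrite | github.com/asAshura/host | python/API_concurrency.py | format_reload
-- ===== SOURCE A (Python) =====
-- def format_reload(input_list, output_list, count):
--     interval = 5
--     if count < len(input_list) - interval:
--         sum_success = 0
--         sum_total = 0
--         for temp in range(interval):
--             sum_success += input_list[count + temp][3]
--             sum_total += input_list[count + temp][4]
--         temp_list = [
--             input_list[count][0],
--             input_list[count][1],
--             input_list[count][2],
--             sum_success,
--             sum_total
--         ]
--         output_list.append(temp_list)
--         return format_reload(input_list, output_list, count + interval)
--     else:
--         return output_list
-- ===== SOURCE B (Python) =====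
-- def format_reload(input_list, output_list, count):
--     interval = 5
--     for start in range(count, len(input_list) - interval, interval):
--         row = input_list[start]
--         output_list.append([
--             row[0], row[1], row[2],
--             sum(input_list[start + t][3] for t in range(interval)),
--             sum(input_list[start + t][4] for t in range(interval)),
--         ])
--     return output_list
-- ===== Notes on version B (the rewrite author's own statement) =====
-- stated objective: idiomatic
-- what changed: Replaced the tail recursion by a single for-loop over range(count, len-5, 5), with the two window sums computed by sum() over generator comprehensions instead of an accumulator loop.
import Mathlib
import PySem

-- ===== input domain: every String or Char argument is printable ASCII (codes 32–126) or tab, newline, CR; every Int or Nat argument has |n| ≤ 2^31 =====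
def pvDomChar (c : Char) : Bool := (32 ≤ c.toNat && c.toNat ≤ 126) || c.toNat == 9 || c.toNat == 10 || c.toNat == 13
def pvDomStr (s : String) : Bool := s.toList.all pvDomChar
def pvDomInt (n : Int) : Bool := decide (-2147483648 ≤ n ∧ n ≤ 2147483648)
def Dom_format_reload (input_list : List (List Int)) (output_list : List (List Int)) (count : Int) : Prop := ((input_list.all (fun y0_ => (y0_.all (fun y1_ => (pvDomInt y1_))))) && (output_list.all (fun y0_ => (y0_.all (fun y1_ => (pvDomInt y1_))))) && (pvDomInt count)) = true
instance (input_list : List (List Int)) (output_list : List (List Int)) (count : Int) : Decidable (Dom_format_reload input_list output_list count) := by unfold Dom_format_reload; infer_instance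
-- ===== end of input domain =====

-- B replaces A's tail recursion by a single for-loop over range(count, len-5, 5) with sum() comprehensions for the two window sums (idiomatic; same cost).


-- ===== PORT A =====
-- Literal port of A's recursion.  List indexing xs[i] is ported as
-- (PySem.List.pyGet? xs i).getD default: exact wherever Python does not raise
-- IndexError (Pre_ excludes the raising inputs).
def format_reload (input_list : List (List Int)) (output_list : List (List Int)) (count : Int) : List (List Int) :=
  if h : count < (input_list.length : Int) - 5 then
    -- for temp in range(interval): sum_success += ...; sum_total += ...
    let sums := (PySem.List.pyRange 0 5 1).foldl
      (fun (p : Int × Int) temp =>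
        let row := (PySem.List.pyGet? input_list (count + temp)).getD []
        (p.1 + (PySem.List.pyGet? row 3).getD 0, p.2 + (PySem.List.pyGet? row 4).getD 0))
      (0, 0)
    let row0 := (PySem.List.pyGet? input_list count).getD []
    let temp_list : List Int :=
      [(PySem.List.pyGet? row0 0).getD 0, (PySem.List.pyGet? row0 1).getD 0,
       (PySem.List.pyGet? row0 2).getD 0, sums.1, sums.2]
    format_reload input_list (output_list ++ [temp_list]) (count + 5)
  else
    output_list
termination_by ((input_list.length : Int) - 5 - count).toNat
decreasing_by omega

-- ===== PORT B =====
-- one appended row of B's loop body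
def pvAltRow (input_list : List (List Int)) (start : Int) : List Int :=
  let row := (PySem.List.pyGet? input_list start).getD []
  [(PySem.List.pyGet? row 0).getD 0, (PySem.List.pyGet? row 1).getD 0,
   (PySem.List.pyGet? row 2).getD 0,
   ((PySem.List.pyRange 0 5 1).map (fun t =>
      (PySem.List.pyGet? ((PySem.List.pyGet? input_list (start + t)).getD []) 3).getD 0)).sum,
   ((PySem.List.pyRange 0 5 1).map (fun t =>
      (PySem.List.pyGet? ((PySem.List.pyGet? input_list (start + t)).getD []) 4).getD 0)).sum]

def format_reload_alt (input_list : List (List Int)) (output_list : List (List Int)) (count : Int) : List (List Int) :=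
  (PySem.List.pyRange count ((input_list.length : Int) - 5) 5).foldl
    (fun acc start => acc ++ [pvAltRow input_list start]) output_list

-- ===== PRECONDITION & SPEC =====
-- Pre_ admits the inputs on which Python A returns without IndexError: either the
-- recursion stops at once (len - 5 ≤ count), or count is a valid (possibly negative,
-- Python-wrapping) start index and every row has the 5 fields read by the windows.
-- This slightly narrows A's domain: A also returns when only rows it never reads
-- (before count or the last one) are short — see claim.json "cites".
def Pre_format_reload (input_list : List (List Int)) (output_list : List (List Int)) (count : Int) : Prop :=
  ((input_list.length : Int) - 5 ≤ count) ∨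
  (-(input_list.length : Int) ≤ count ∧ ∀ l ∈ input_list, 5 ≤ l.length)
instance (input_list : List (List Int)) (output_list : List (List Int)) (count : Int) : Decidable (Pre_format_reload input_list output_list count) := by unfold Pre_format_reload; infer_instance

def pvWitness_format_reload : List (List Int) × List (List Int) × Int :=
  ([[1,2,3,4,5],[0,0,0,1,2],[0,0,0,1,2],[0,0,0,1,2],[0,0,0,1,2],[9,9,9,9,9]], [], 0)

def Spec_format_reload (input_list : List (List Int)) (output_list : List (List Int)) (count : Int) (out : List (List Int)) : Prop := out = format_reload_alt input_list output_list count
instance (input_list : List (List Int)) (output_list : List (List Int)) (count : Int) (out : List (List Int)) : Decidable (Spec_format_reload input_list output_list count out) := by unfold Spec_format_reload; infer_instance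

-- ===== CLAIM (what is proved, stated in full; the proofs are below) =====
def Claim_equal_format_reload : Prop := ∀ (input_list : List (List Int)) (output_list : List (List Int)) (count : Int), Dom_format_reload input_list output_list count → Pre_format_reload input_list output_list count → Spec_format_reload input_list output_list count (format_reload input_list output_list count)

-- ===== LEMMAS AND PROOFS =====
lemma pyRange_five_nil (a b : Int) (h : b ≤ a) : PySem.List.pyRange a b 5 = [] := by
  rw [PySem.List.pyRange_of_pos a b (by norm_num)]
  simp [if_neg (not_lt.mpr h)]

lemma pyRange_five_cons (a b : Int) (h : a < b) :
    PySem.List.pyRange a b 5 = a :: PySem.List.pyRange (a + 5) b 5 := by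
  rw [PySem.List.pyRange_of_pos a b (by norm_num),
      PySem.List.pyRange_of_pos (a + 5) b (by norm_num)]
  have hn : ((b - a + 5 - 1) / 5).toNat
      = (if a + 5 < b then ((b - (a + 5) + 5 - 1) / 5).toNat else 0) + 1 := by
    split_ifs <;> omega
  rw [if_pos h, hn, List.range_succ_eq_map]
  simp only [List.map_cons, List.map_map]
  refine List.cons_eq_cons.mpr ⟨by push_cast; ring, ?_⟩
  apply List.map_congr_left
  intro k _
  simp only [Function.comp_apply]
  push_cast
  ring

-- A's window row equals B's window row
lemma row_eq (input_list : List (List Int)) (count : Int) :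
    [(PySem.List.pyGet? ((PySem.List.pyGet? input_list count).getD []) 0).getD 0,
     (PySem.List.pyGet? ((PySem.List.pyGet? input_list count).getD []) 1).getD 0,
     (PySem.List.pyGet? ((PySem.List.pyGet? input_list count).getD []) 2).getD 0,
     ((PySem.List.pyRange 0 5 1).foldl
        (fun (p : Int × Int) temp =>
          let row := (PySem.List.pyGet? input_list (count + temp)).getD []
          (p.1 + (PySem.List.pyGet? row 3).getD 0, p.2 + (PySem.List.pyGet? row 4).getD 0))
        (0, 0)).1,
     ((PySem.List.pyRange 0 5 1).foldl
        (fun (p : Int × Int) temp =>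
          let row := (PySem.List.pyGet? input_list (count + temp)).getD []
          (p.1 + (PySem.List.pyGet? row 3).getD 0, p.2 + (PySem.List.pyGet? row 4).getD 0))
        (0, 0)).2]
    = pvAltRow input_list count := by
  have h5 : PySem.List.pyRange 0 5 1 = [0, 1, 2, 3, 4] := by decide
  simp only [pvAltRow, h5, List.foldl_cons, List.foldl_nil, List.map_cons, List.map_nil,
    List.sum_cons, List.sum_nil, List.cons.injEq, and_true, true_and]
  constructor <;> ring

lemma format_reload_eq_alt (input_list : List (List Int)) :
    ∀ (n : Nat) (output_list : List (List Int)) (count : Int),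
      (((input_list.length : Int) - 5 - count).toNat = n) →
      format_reload input_list output_list count = format_reload_alt input_list output_list count := by
  intro n
  induction n using Nat.strong_induction_on with
  | _ n ih =>
    intro output_list count hn
    rw [format_reload]
    by_cases h : count < (input_list.length : Int) - 5
    · rw [dif_pos h]
      rw [ih (((input_list.length : Int) - 5 - (count + 5)).toNat) (by omega) _ _ rfl]
      unfold format_reload_alt
      rw [pyRange_five_cons _ _ h, List.foldl_cons]
      rw [row_eq]
    · rw [dif_neg h]
      unfold format_reload_alt
      rw [pyRange_five_nil _ _ (by omega), List.foldl_nil]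

-- ===== VERDICT (by name: the statement is the Claim_ definition above) =====
theorem format_reload_spec : Claim_equal_format_reload := by
  intro input_list output_list count _ _
  unfold Spec_format_reload
  exact format_reload_eq_alt input_list _ output_list count rfl
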